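-- pv_equiv track=rewrite | github.com/adityardesai/Coding | DataStructures/graphs/connected_cell_in_grid.py | dfs
-- ===== SOURCE A (Python) =====
-- def is_valid(grid, x, y):
--     if x < 0 or y < 0 or x > len(grid) - 1 or y > len(grid[0]) - 1:
--         return False
--     return True
--
-- def dfs(grid, r, c):
--
--     DIRECTIONS = [(1, 0), (-1, 0), (0, 1), (0, -1), (1, 1), (1, -1), (-1, 1),
--                   (-1, -1)]
--     grid[r][c] = -1
--     count = 1
--     for d in DIRECTIONS:
--         n_r = d[0] + r
--         n_c = d[1] + c
--         if is_valid(grid, n_r, n_c) and grid[n_r][n_c] == 1: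
--             count += dfs(grid, n_r, n_c)
--     return count
-- ===== SOURCE B (Python) =====
-- def dfs(grid, r, c):
--     DIRECTIONS = [(1, 0), (-1, 0), (0, 1), (0, -1), (1, 1), (1, -1), (-1, 1),
--                   (-1, -1)]
--     rows, cols = len(grid), len(grid[0])
--     grid[r][c] = -1
--     count = 1
--     stack = [(r, c, 0)]
--     while stack:
--         x, y, i = stack.pop()
--         if i >= 8:
--             continue
--         stack.append((x, y, i + 1))
--         dx, dy = DIRECTIONS[i]
--         nx, ny = x + dx, y + dy
--         if 0 <= nx < rows and 0 <= ny < cols and grid[nx][ny] == 1: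
--             grid[nx][ny] = -1
--             count += 1
--             stack.append((nx, ny, 0))
--     return count
-- ===== Notes on version B (the rewrite author's own statement) =====
-- stated objective: alternative
-- what changed: A's recursive DFS is replaced by an iterative explicit-stack flood fill (stack frames carry the cell and the next direction index), eliminating recursion; cells are still marked -1 at discovery so the count and the in-place grid mutation are identical.
-- outside the precondition, e.g. on dfs([[5], [7, 8]], 0, 0): A returns 1, B returns 1
import Mathlib
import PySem

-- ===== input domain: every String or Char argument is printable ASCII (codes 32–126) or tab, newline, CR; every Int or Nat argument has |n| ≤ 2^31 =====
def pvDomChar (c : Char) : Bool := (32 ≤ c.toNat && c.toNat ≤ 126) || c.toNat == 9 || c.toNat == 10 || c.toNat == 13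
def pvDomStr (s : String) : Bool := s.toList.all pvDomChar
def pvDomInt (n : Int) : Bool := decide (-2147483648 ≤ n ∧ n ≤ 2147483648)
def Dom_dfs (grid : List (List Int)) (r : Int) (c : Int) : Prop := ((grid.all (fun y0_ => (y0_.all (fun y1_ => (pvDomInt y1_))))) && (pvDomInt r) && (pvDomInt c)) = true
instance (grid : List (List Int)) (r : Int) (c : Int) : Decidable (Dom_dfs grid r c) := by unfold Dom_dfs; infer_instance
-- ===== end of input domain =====

-- B replaces A's recursive DFS by an iterative explicit-stack machine (frames carry the next
-- direction index); same return value, and both Pythons perform the identical in-place marking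
-- of the grid (cells set to -1 at discovery, in the same order).

-- Shared primitives (used by both ports; each mirrors its Python's grid[x][y] accesses):
-- DIRECTIONS literal, grid[x][y] read (Python wrap semantics) and grid[x][y] = v write.
def DIRS : List (Int × Int) :=
  [(1, 0), (-1, 0), (0, 1), (0, -1), (1, 1), (1, -1), (-1, 1), (-1, -1)]

def get2 (g : List (List Int)) (x y : Int) : Option Int :=
  (PySem.List.pyGet? g x).bind fun row => PySem.List.pyGet? row y

def set2 (g : List (List Int)) (x y : Int) (v : Int) : List (List Int) :=
  match PySem.List.pyIdx? g.length x with
  | none => g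
  | some k => g.set k (PySem.List.pySetD (g.getD k []) y v)

-- number of 1-cells: the termination measure of both ports (not part of either algorithm's result)
def onesRow (row : List Int) : Nat := row.count 1
def onesG (g : List (List Int)) : Nat := (g.map onesRow).sum

-- termination lemmas (cited by the ports' decreasing_by)
lemma count_set_lt (row : List Int) (j : Nat) (h : row[j]? = some 1) :
    (row.set j (-1)).count 1 < row.count 1 := by
  induction row generalizing j with
  | nil => simp at h
  | cons a t ih =>
    cases j with
    | zero =>
      simp at h
      subst h
      simp
    | succ j =>
      simp at h
      have := ih j h
      simp only [List.set_cons_succ, List.count_cons]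
      omega

lemma ones_sum_set (g : List (List Int)) (k : Nat) (row r' : List Int)
    (h : g[k]? = some row) :
    onesG (g.set k r') + onesRow row = onesG g + onesRow r' := by
  induction g generalizing k with
  | nil => simp at h
  | cons a t ih =>
    cases k with
    | zero => simp at h; subst h; simp [onesG]; omega
    | succ k =>
      simp at h
      have := ih k h
      simp [onesG] at *
      omega

lemma ones_set2_lt (g : List (List Int)) (x y : Int)
    (h : get2 g x y = some 1) : onesG (set2 g x y (-1)) < onesG g := by
  unfold get2 at h
  unfold set2
  cases hg : PySem.List.pyGet? g x with
  | none => rw [hg] at h; simp at h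
  | some row =>
    rw [hg] at h
    simp only [Option.bind_some] at h
    unfold PySem.List.pyGet? at hg
    cases hk : PySem.List.pyIdx? g.length x with
    | none => rw [hk] at hg; simp at hg
    | some k =>
      rw [hk] at hg
      simp only [Option.bind_some] at hg
      show onesG (g.set k (PySem.List.pySetD (g.getD k []) y (-1))) < onesG g
      have hget : g.getD k [] = row := by
        have hk' : k < g.length := by
          by_contra hnot
          rw [List.getElem?_eq_none (by omega)] at hg
          simp at hg
        rw [List.getD_eq_getElem _ _ hk', ← Option.some_inj, ← List.getElem?_eq_getElem hk', hg]
      rw [hget]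
      -- the inner write: pySetD row y (-1); h : pyGet? row y = some 1
      unfold PySem.List.pyGet? at h
      cases hj : PySem.List.pyIdx? row.length y with
      | none => rw [hj] at h; simp at h
      | some j =>
        rw [hj] at h
        simp only [Option.bind_some] at h
        have hset : PySem.List.pySetD row y (-1) = row.set j (-1) := by
          unfold PySem.List.pySetD PySem.List.pySet?
          rw [hj]; rfl
        rw [hset]
        have h1 : (row.set j (-1)).count 1 < row.count 1 := count_set_lt row j h
        have h2 := ones_sum_set g k row (row.set j (-1)) hg
        unfold onesRow at h2
        omega

-- ===== PORT A =====
-- is_valid(grid, x, y); Python's len(grid[0]) raises on an empty grid (excluded by Pre_),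
-- headD [] is the total stand-in for grid[0] there.
def isValid (g : List (List Int)) (x y : Int) : Bool :=
  if x < 0 ∨ y < 0 ∨ x > (g.length : Int) - 1 ∨ y > ((g.headD []).length : Int) - 1 then
    false
  else
    true

-- the body of dfs after `grid[r][c] = -1; count = 1`: the for-loop over the remaining
-- DIRECTIONS, threading the mutated grid; the recursive call `dfs(grid, n_r, n_c)` is the
-- hit branch (its own `grid[n_r][n_c] = -1` is the set2 here, its loop starts over DIRS at
-- count 1).  The subtype bound `onesG ≤` only carries the termination invariant.
def dfsGo (g : List (List Int)) (r c : Int) (ds : List (Int × Int)) (count : Int) :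
    { p : Int × List (List Int) // onesG p.2 ≤ onesG g } :=
  match ds with
  | [] => ⟨(count, g), le_refl _⟩
  | d :: rest =>
    if h : isValid g (d.1 + r) (d.2 + c) = true ∧ get2 g (d.1 + r) (d.2 + c) = some 1 then
      let p := dfsGo (set2 g (d.1 + r) (d.2 + c) (-1)) (d.1 + r) (d.2 + c) DIRS 1
      let q := dfsGo p.1.2 r c rest (count + p.1.1)
      ⟨q.1, le_trans q.2 (le_trans p.2 (le_of_lt (ones_set2_lt g _ _ h.2)))⟩
    else
      let q := dfsGo g r c rest count
      ⟨q.1, q.2⟩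
termination_by (onesG g, ds.length)
decreasing_by
  · exact Prod.Lex.left _ _ (ones_set2_lt g _ _ h.2)
  · exact Prod.Lex.left _ _ (lt_of_le_of_lt p.2 (ones_set2_lt g _ _ h.2))
  · exact Prod.Lex.right _ (Nat.lt_succ_self _)

def dfs (grid : List (List Int)) (r : Int) (c : Int) : Int :=
  (dfsGo (set2 grid r c (-1)) r c DIRS 1).1.1

-- ===== PORT B =====
-- iterative flood fill with an explicit stack of frames (x, y, next-direction-index);
-- the Lean list's head is the Python list's last element (the stack top); rows/cols are
-- computed once, from the original grid, as in Source B.  Returns the final (count, grid) state.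
def flood (rows cols : Int) (g : List (List Int)) (stack : List (Int × Int × Nat))
    (count : Int) : Int × List (List Int) :=
  match stack with
  | [] => (count, g)
  | (x, y, i) :: rest =>
    if h8 : 8 ≤ i then
      flood rows cols g rest count
    else
      let d := DIRS.getD i (0, 0)
      if h : (0 ≤ x + d.1 ∧ x + d.1 < rows ∧ 0 ≤ y + d.2 ∧ y + d.2 < cols) ∧
             get2 g (x + d.1) (y + d.2) = some 1 then
        flood rows cols (set2 g (x + d.1) (y + d.2) (-1))
          ((x + d.1, y + d.2, 0) :: (x, y, i + 1) :: rest) (count + 1)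
      else
        flood rows cols g ((x, y, i + 1) :: rest) count
termination_by 9 * onesG g + (((stack.map fun f => 8 - f.2.2).sum) + stack.length)
decreasing_by
  · simp only [List.map_cons, List.sum_cons, List.length_cons]
    omega
  · have := ones_set2_lt g (x + (DIRS.getD i (0, 0)).1) (y + (DIRS.getD i (0, 0)).2) h.2
    simp only [List.map_cons, List.sum_cons, List.length_cons]
    omega
  · simp only [List.map_cons, List.sum_cons, List.length_cons]
    omega

def dfs_alt (grid : List (List Int)) (r : Int) (c : Int) : Int :=
  let rows : Int := (grid.length : Int)
  let cols : Int := ((grid.headD []).length : Int)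
  (flood rows cols (set2 grid r c (-1)) [(r, c, 0)] 1).1

-- ===== PRECONDITION & SPEC =====
-- Pre_ excludes inputs where Python A raises (empty grid, empty first row, start index outside
-- Python's wrap range) and non-rectangular grids, on which A's is_valid bound len(grid[0]) does
-- not match the actual row lengths so A raises IndexError for most starts; on the ragged grids
-- where A does return, B returns the same value (see the cited excluded example).
def Pre_dfs (grid : List (List Int)) (r : Int) (c : Int) : Prop :=
  grid ≠ [] ∧ 0 < (grid.headD []).length ∧
  (∀ row ∈ grid, row.length = (grid.headD []).length) ∧
  -(grid.length : Int) ≤ r ∧ r < (grid.length : Int) ∧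
  -((grid.headD []).length : Int) ≤ c ∧ c < ((grid.headD []).length : Int)
instance (grid : List (List Int)) (r : Int) (c : Int) : Decidable (Pre_dfs grid r c) := by
  unfold Pre_dfs; infer_instance

def pvWitness_dfs : List (List Int) × Int × Int := ([[1, 0], [1, 1]], 0, 0)

def Spec_dfs (grid : List (List Int)) (r : Int) (c : Int) (out : Int) : Prop := out = dfs_alt grid r c
instance (grid : List (List Int)) (r : Int) (c : Int) (out : Int) : Decidable (Spec_dfs grid r c out) := by unfold Spec_dfs; infer_instance

-- ===== CLAIM (what is proved, stated in full; the proofs are below) =====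
def Claim_equal_dfs : Prop := ∀ (grid : List (List Int)) (r : Int) (c : Int), Dom_dfs grid r c → Pre_dfs grid r c → Spec_dfs grid r c (dfs grid r c)

-- ===== LEMMAS AND PROOFS =====

lemma length_set2 (g : List (List Int)) (x y v : Int) : (set2 g x y v).length = g.length := by
  unfold set2
  cases PySem.List.pyIdx? g.length x <;> simp

lemma headlen_set2 (g : List (List Int)) (x y v : Int) :
    ((set2 g x y v).headD []).length = ((g.headD []).length) := by
  unfold set2
  cases h : PySem.List.pyIdx? g.length x with
  | none => rfl
  | some k =>
    cases g with
    | nil => simp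
    | cons a t =>
      cases k with
      | zero => simp [PySem.List.length_pySetD]
      | succ k => simp

lemma dfsGo_shape (g : List (List Int)) (r c : Int) (ds : List (Int × Int)) (count : Int) :
    (dfsGo g r c ds count).1.2.length = g.length ∧
    (((dfsGo g r c ds count).1.2.headD []).length = ((g.headD []).length)) := by
  fun_induction dfsGo g r c ds count with
  | case1 g r c count => exact ⟨rfl, rfl⟩
  | case2 g r c count d rest h p q ih1 ih2 =>
    exact ⟨ih2.1.trans (ih1.1.trans (length_set2 _ _ _ _)),
           ih2.2.trans (ih1.2.trans (headlen_set2 _ _ _ _))⟩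
  | case3 g r c count d rest h q ih =>
    exact ih

lemma dfsGo_add (g : List (List Int)) (r c : Int) (ds : List (Int × Int)) (b : Int) :
    ∀ a : Int, (dfsGo g r c ds (a + b)).1.1 = a + (dfsGo g r c ds b).1.1 ∧
               (dfsGo g r c ds (a + b)).1.2 = (dfsGo g r c ds b).1.2 := by
  fun_induction dfsGo g r c ds b with
  | case1 g r c b => intro a; simp [dfsGo]
  | case2 g r c b d rest h p q ih1 ih2 =>
    intro a
    simp only [dfsGo]
    rw [dif_pos h]
    simp only [add_assoc]
    exact ih2 a
  | case3 g r c b d rest h q ih =>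
    intro a
    simp only [dfsGo]
    rw [dif_neg h]
    exact ih a

lemma isValid_iff (g : List (List Int)) (x y : Int) :
    (isValid g x y = true) ↔
    (0 ≤ x ∧ x < (g.length : Int) ∧ 0 ≤ y ∧ y < ((g.headD []).length : Int)) := by
  unfold isValid
  split <;> rename_i hcond
  · constructor
    · intro hf; exact absurd hf (by simp)
    · intro hb; omega
  · constructor
    · intro _; push Not at hcond; omega
    · intro _; rfl

lemma drop_DIRS (i : Nat) (h : i < 8) :
    DIRS.drop i = DIRS.getD i (0, 0) :: DIRS.drop (i + 1) := by
  have hl : i < DIRS.length := by simp [DIRS]; omega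
  rw [List.getD_eq_getElem _ _ hl, List.drop_eq_getElem_cons hl]

lemma drop_DIRS_nil (i : Nat) (h : 8 ≤ i) : DIRS.drop i = [] := by
  apply List.drop_of_length_le
  simp [DIRS]; omega

-- the simulation: running the machine with top frame (x, y, i) is A's loop over the
-- directions from index i onward, then the machine on the rest of the stack
lemma flood_sim (n : Nat) :
    ∀ (g : List (List Int)) (x y : Int) (i : Nat) (rest : List (Int × Int × Nat)) (cnt : Int)
      (rows cols : Int),
      9 * onesG g + ((((x, y, i) :: rest).map fun f => 8 - f.2.2).sum + ((x, y, i) :: rest).length) ≤ n →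
      rows = (g.length : Int) → cols = ((g.headD []).length : Int) →
      flood rows cols g ((x, y, i) :: rest) cnt =
        flood rows cols (dfsGo g x y (DIRS.drop i) cnt).1.2 rest (dfsGo g x y (DIRS.drop i) cnt).1.1 := by
  induction n using Nat.strong_induction_on with
  | _ n IH =>
    intro g x y i rest cnt rows cols hm hr hc
    by_cases h8 : 8 ≤ i
    · rw [drop_DIRS_nil i h8]
      simp only [dfsGo]
      rw [flood]
      rw [dif_pos h8]
    · rw [drop_DIRS i (by omega)]
      rw [flood, dif_neg h8]
      set d := DIRS.getD i (0, 0) with hd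
      have ecomm1 : x + d.1 = d.1 + x := by ring
      have ecomm2 : y + d.2 = d.2 + y := by ring
      by_cases hg : isValid g (d.1 + x) (d.2 + y) = true ∧ get2 g (d.1 + x) (d.2 + y) = some 1
      · -- hit branch on both sides
        have hb : (0 ≤ x + d.1 ∧ x + d.1 < rows ∧ 0 ≤ y + d.2 ∧ y + d.2 < cols) ∧
                  get2 g (x + d.1) (y + d.2) = some 1 := by
          rw [ecomm1, ecomm2, hr, hc]
          refine ⟨?_, hg.2⟩
          have := (isValid_iff g (d.1 + x) (d.2 + y)).1 hg.1
          exact ⟨this.1, this.2.1, this.2.2.1, this.2.2.2⟩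
        rw [dif_pos hb]
        simp only [dfsGo]
        rw [dif_pos hg]
        rw [ecomm1, ecomm2]
        set gs := set2 g (d.1 + x) (d.2 + y) (-1) with hgs
        have hones : onesG gs < onesG g := ones_set2_lt g _ _ hg.2
        -- first IH application: process the pushed frame (nx, ny, 0)
        have m1 : 9 * onesG gs + ((((d.1 + x, d.2 + y, 0) :: (x, y, i + 1) :: rest).map
              fun f => 8 - f.2.2).sum + ((d.1 + x, d.2 + y, 0) :: (x, y, i + 1) :: rest).length)
              < n := by
          simp only [List.map_cons, List.sum_cons, List.length_cons] at hm ⊢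
          omega
        have hr1 : rows = (gs.length : Int) := by rw [hr, length_set2]
        have hc1 : cols = ((gs.headD []).length : Int) := by rw [hc, headlen_set2]
        rw [IH _ m1 gs (d.1 + x) (d.2 + y) 0 ((x, y, i + 1) :: rest) (cnt + 1) rows cols
              (le_refl _) hr1 hc1]
        rw [List.drop_zero]
        -- relate count-(cnt+1) run to count-1 run
        have hadd := dfsGo_add gs (d.1 + x) (d.2 + y) DIRS 1 cnt
        set p := dfsGo gs (d.1 + x) (d.2 + y) DIRS 1 with hp
        set P := dfsGo gs (d.1 + x) (d.2 + y) DIRS (cnt + 1) with hP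
        -- second IH application: resume the old frame at index i+1
        have hPb : onesG P.1.2 ≤ onesG gs := P.2
        have m2 : 9 * onesG P.1.2 + ((((x, y, i + 1) :: rest).map fun f => 8 - f.2.2).sum +
              ((x, y, i + 1) :: rest).length) < n := by
          simp only [List.map_cons, List.sum_cons, List.length_cons] at hm ⊢
          omega
        have hr2 : rows = (P.1.2.length : Int) := by
          rw [hr1, (dfsGo_shape gs (d.1 + x) (d.2 + y) DIRS (cnt + 1)).1]
        have hc2 : cols = ((P.1.2.headD []).length : Int) := by
          rw [hc1, (dfsGo_shape gs (d.1 + x) (d.2 + y) DIRS (cnt + 1)).2]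
        rw [IH _ m2 P.1.2 x y (i + 1) rest P.1.1 rows cols (le_refl _) hr2 hc2]
        rw [hadd.1, hadd.2]
      · -- miss branch on both sides
        have hb : ¬ ((0 ≤ x + d.1 ∧ x + d.1 < rows ∧ 0 ≤ y + d.2 ∧ y + d.2 < cols) ∧
                  get2 g (x + d.1) (y + d.2) = some 1) := by
          rw [ecomm1, ecomm2, hr, hc]
          intro hcon
          exact hg ⟨(isValid_iff g (d.1 + x) (d.2 + y)).2
            ⟨hcon.1.1, hcon.1.2.1, hcon.1.2.2.1, hcon.1.2.2.2⟩, hcon.2⟩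
        rw [dif_neg hb]
        simp only [dfsGo]
        rw [dif_neg hg]
        have m1 : 9 * onesG g + ((((x, y, i + 1) :: rest).map fun f => 8 - f.2.2).sum +
              ((x, y, i + 1) :: rest).length) < n := by
          simp only [List.map_cons, List.sum_cons, List.length_cons] at hm ⊢
          omega
        exact IH _ m1 g x y (i + 1) rest cnt rows cols (le_refl _) hr hc

lemma dfs_eq_alt (grid : List (List Int)) (r : Int) (c : Int) :
    dfs grid r c = dfs_alt grid r c := by
  unfold dfs dfs_alt
  dsimp only
  set g1 := set2 grid r c (-1) with hg1
  have hr : ((grid.length : Nat) : Int) = (g1.length : Int) := by rw [length_set2]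
  have hc : (((grid.headD []).length : Nat) : Int) = ((g1.headD []).length : Int) := by
    rw [headlen_set2]
  rw [flood_sim _ g1 r c 0 [] 1 _ _ (le_refl _) hr hc]
  rw [List.drop_zero]
  rw [flood]

-- ===== VERDICT (by name: the statement is the Claim_ definition above) =====
theorem dfs_spec : Claim_equal_dfs := by
  intro grid r c _ _
  exact dfs_eq_alt grid r c
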